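-- pv_equiv track=rewrite | github.com/paul-talma/advent_of_code | 2025/day03/day03.py | find_largest_subdigits
-- ===== SOURCE A (Python) =====
-- def find_largest_subdigits(digits) -> int:
--     best_l = digits[0]
--     best_r = digits[1]
--
--     for i in range(1, len(digits) - 1):
--         l = digits[i]
--         r = digits[i + 1]
--         if l > best_l:
--             best_l = l
--             best_r = r
--         elif r > best_r:
--             best_r = r
--     return best_l * 10 + best_r
-- ===== SOURCE B (Python) =====
-- def find_largest_subdigits(digits) -> int:
--     M = max(digits[:-1])
--     p = digits.index(M)
--     return M * 10 + max(digits[p + 1:])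
-- ===== Notes on version B (the rewrite author's own statement) =====
-- stated objective: simpler
-- what changed: Replaces the interleaved greedy left/right pass with a direct decomposition: take the maximum of all but the last element, find its first position, and pair it with the maximum of the remaining suffix.
import Mathlib
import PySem

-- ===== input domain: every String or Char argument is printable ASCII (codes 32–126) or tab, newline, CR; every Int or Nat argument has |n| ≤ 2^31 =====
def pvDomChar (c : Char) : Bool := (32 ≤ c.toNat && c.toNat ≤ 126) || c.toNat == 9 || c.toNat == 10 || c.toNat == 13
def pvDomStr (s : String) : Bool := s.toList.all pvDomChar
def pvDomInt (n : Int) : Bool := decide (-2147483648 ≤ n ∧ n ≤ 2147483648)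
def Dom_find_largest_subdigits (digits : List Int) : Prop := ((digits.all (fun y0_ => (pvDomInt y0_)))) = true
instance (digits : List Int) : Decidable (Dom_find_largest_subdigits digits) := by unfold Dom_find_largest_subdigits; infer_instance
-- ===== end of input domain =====

-- B replaces A's interleaved greedy pass by max-of-prefix + first-occurrence + max-of-suffix; objective: simpler.

-- ===== PORT A =====
def find_largest_subdigits (digits : List Int) : Int :=
  let best_l := (PySem.List.pyGet? digits 0).getD 0
  let best_r := (PySem.List.pyGet? digits 1).getD 0
  let s := (PySem.List.pyRange 1 ((digits.length : Int) - 1) 1).foldl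
    (fun (s : Int × Int) i =>
      let l := (PySem.List.pyGet? digits i).getD 0
      let r := (PySem.List.pyGet? digits (i + 1)).getD 0
      if l > s.1 then (l, r)
      else if r > s.2 then (s.1, r)
      else s) (best_l, best_r)
  s.1 * 10 + s.2

-- ===== PORT B =====
def find_largest_subdigits_alt (digits : List Int) : Int :=
  let m := (PySem.List.max? (PySem.List.slice digits none (some (-1))) (fun x => x)).getD 0
  let p := (PySem.List.index? digits m).getD 0
  m * 10 + (PySem.List.max? (PySem.List.slice digits (some ((p : Int) + 1)) none) (fun x => x)).getD 0

-- ===== PRECONDITION & SPEC =====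
-- Python A raises IndexError on lists of length < 2 (digits[0] / digits[1]); B raises ValueError there too.
def Pre_find_largest_subdigits (digits : List Int) : Prop := 2 ≤ digits.length
instance (digits : List Int) : Decidable (Pre_find_largest_subdigits digits) := by unfold Pre_find_largest_subdigits; infer_instance
def pvWitness_find_largest_subdigits : List Int := [3, 5]

def Spec_find_largest_subdigits (digits : List Int) (out : Int) : Prop := out = find_largest_subdigits_alt digits
instance (digits : List Int) (out : Int) : Decidable (Spec_find_largest_subdigits digits out) := by unfold Spec_find_largest_subdigits; infer_instance

-- ===== CLAIM (what is proved, stated in full; the proofs are below) =====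
def Claim_equal_find_largest_subdigits : Prop := ∀ (digits : List Int), Dom_find_largest_subdigits digits → Pre_find_largest_subdigits digits → Spec_find_largest_subdigits digits (find_largest_subdigits digits)

-- ===== LEMMAS AND PROOFS =====

-- structural form of A's loop: state (best_l, best_r), walking the adjacent pairs of the list
def goA (bl br : Int) : List Int → Int × Int
  | a :: b :: t =>
    if a > bl then goA a b (b :: t)
    else if b > br then goA bl b (b :: t)
    else goA bl br (b :: t)
  | _ => (bl, br)

-- max of a nonempty list, 0 on []
def mxI : List Int → Int
  | [] => 0
  | a :: t => t.foldl max a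

theorem mxI_eq_max?getD (l : List Int) : (PySem.List.max? l (fun x => x)).getD 0 = mxI l := by
  cases l with
  | nil => rfl
  | cons a t => rw [PySem.List.max?_id_cons]; rfl

theorem goA_short (bl br : Int) (l : List Int) (h : l.length ≤ 1) : goA bl br l = (bl, br) := by
  match l, h with
  | [], _ => rfl
  | [a], _ => rfl

theorem foldA_eq_goA (digits : List Int) (m : Nat) :
    ∀ (k : Nat) (bl br : Int), digits.length - k ≤ m →
    (PySem.List.pyRange (k : Int) ((digits.length : Int) - 1) 1).foldl
      (fun (s : Int × Int) i =>
        if (PySem.List.pyGet? digits i).getD 0 > s.1 then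
          ((PySem.List.pyGet? digits i).getD 0, (PySem.List.pyGet? digits (i + 1)).getD 0)
        else if (PySem.List.pyGet? digits (i + 1)).getD 0 > s.2 then
          (s.1, (PySem.List.pyGet? digits (i + 1)).getD 0)
        else s) (bl, br) = goA bl br (digits.drop k) := by
  induction m with
  | zero =>
    intro k bl br hm
    rw [PySem.List.pyRange_one_eq_nil (by omega), List.foldl_nil,
      goA_short _ _ _ (by simp; omega)]
  | succ m ih =>
    intro k bl br hm
    by_cases hk : k + 1 < digits.length
    · have h1 : (k : Int) < (digits.length : Int) - 1 := by omega
      rw [PySem.List.pyRange_one_cons h1, List.foldl_cons]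
      have hdrop : digits.drop k = digits[k] :: digits.drop (k + 1) :=
        List.drop_eq_getElem_cons (by omega)
      have hdrop1 : digits.drop (k + 1) = digits[k + 1] :: digits.drop (k + 2) :=
        List.drop_eq_getElem_cons (by omega)
      have hl : (PySem.List.pyGet? digits (k : Int)).getD 0 = digits[k] := by
        rw [PySem.List.pyGet?_natCast, List.getElem?_eq_getElem (by omega)]; rfl
      have hcast : (k : Int) + 1 = ((k + 1 : Nat) : Int) := by push_cast; ring
      have hr : (PySem.List.pyGet? digits ((k : Int) + 1)).getD 0 = digits[k + 1] := by
        rw [hcast, PySem.List.pyGet?_natCast, List.getElem?_eq_getElem (by omega)]; rfl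
      simp only [hl, hr]
      rw [hdrop, hdrop1, goA]
      split_ifs with h1' h2' <;>
        · rw [hcast, ih (k + 1) _ _ (by omega), hdrop1]
    · rw [PySem.List.pyRange_one_eq_nil (by omega), List.foldl_nil,
        goA_short _ _ _ (by simp; omega)]

theorem goA_spec (l : List Int) : ∀ (bl br : Int),
    goA bl br l = (l.dropLast.foldl max bl,
      if bl < l.dropLast.foldl max bl
      then mxI (l.drop (l.idxOf (l.dropLast.foldl max bl) + 1))
      else l.tail.foldl max br) := by
  induction l with
  | nil => intro bl br; simp [goA]
  | cons a l' ih =>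
    cases l' with
    | nil => intro bl br; simp [goA]
    | cons b t =>
      intro bl br
      have haM := (PySem.List.le_foldl_max (b :: t).dropLast a).1
      rw [goA, List.dropLast_cons₂, List.foldl_cons]
      by_cases h1 : a > bl
      · rw [if_pos h1, ih a b, max_eq_right (le_of_lt h1),
          if_pos (lt_of_lt_of_le h1 haM)]
        by_cases hc : a < (b :: t).dropLast.foldl max a
        · rw [if_pos hc, List.idxOf_cons_ne _ (ne_of_lt hc)]
          simp [Nat.succ_eq_add_one, List.drop_succ_cons]
        · have haM' : a = (b :: t).dropLast.foldl max a := le_antisymm haM (not_lt.mp hc)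
          rw [if_neg hc, ← haM', List.idxOf_cons_self]
          simp [mxI]
      · rw [if_neg h1, max_eq_left (not_lt.mp h1)]
        by_cases h2 : b > br
        · rw [if_pos h2, ih bl b]
          by_cases hc : bl < (b :: t).dropLast.foldl max bl
          · have haM2 : a ≠ (b :: t).dropLast.foldl max bl :=
              ne_of_lt (lt_of_le_of_lt (not_lt.mp h1) hc)
            rw [if_pos hc, if_pos hc, List.idxOf_cons_ne _ haM2]
            simp [Nat.succ_eq_add_one, List.drop_succ_cons]
          · rw [if_neg hc, if_neg hc]
            show (_, t.foldl max b) = (_, (b :: t).foldl max br)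
            rw [List.foldl_cons, max_eq_right (le_of_lt h2)]
        · rw [if_neg h2, ih bl br]
          by_cases hc : bl < (b :: t).dropLast.foldl max bl
          · have haM2 : a ≠ (b :: t).dropLast.foldl max bl :=
              ne_of_lt (lt_of_le_of_lt (not_lt.mp h1) hc)
            rw [if_pos hc, if_pos hc, List.idxOf_cons_ne _ haM2]
            simp [Nat.succ_eq_add_one, List.drop_succ_cons]
          · rw [if_neg hc, if_neg hc]
            show (_, t.foldl max br) = (_, (b :: t).foldl max br)
            rw [List.foldl_cons, max_eq_left (not_lt.mp h2)]

theorem idxOf?_of_mem (a : Int) (l : List Int) (h : a ∈ l) : l.idxOf? a = some (l.idxOf a) := by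
  simp [List.idxOf?, List.idxOf, List.findIdx?_eq_some_iff_findIdx_eq]
  exact h

theorem final_assembly (digits : List Int) (h : 2 ≤ digits.length) :
    find_largest_subdigits digits = find_largest_subdigits_alt digits := by
  match digits, h with
  | d0 :: d1 :: rest, _ =>
    have hd0M : d0 ≤ (d1 :: rest).dropLast.foldl max d0 :=
      (PySem.List.le_foldl_max (d1 :: rest).dropLast d0).1
    have hmem : (d1 :: rest).dropLast.foldl max d0 ∈ d0 :: d1 :: rest := by
      rcases PySem.List.foldl_max_mem (d1 :: rest).dropLast d0 with he | hm
      · rw [he]; exact List.mem_cons_self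
      · exact List.mem_cons_of_mem d0 (List.mem_of_mem_dropLast hm)
    -- evaluate port A down to goA_spec's right-hand side
    have hA : find_largest_subdigits (d0 :: d1 :: rest) =
        (d1 :: rest).dropLast.foldl max d0 * 10 +
        (if d0 < (d1 :: rest).dropLast.foldl max d0
         then mxI ((d1 :: rest).drop ((d1 :: rest).idxOf ((d1 :: rest).dropLast.foldl max d0) + 1))
         else rest.foldl max d1) := by
      have hbl : (PySem.List.pyGet? (d0 :: d1 :: rest) 0).getD 0 = d0 := by
        rw [PySem.List.pyGet?_zero]; rfl
      have hbr : (PySem.List.pyGet? (d0 :: d1 :: rest) 1).getD 0 = d1 := by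
        simp [PySem.List.pyGet?, PySem.List.pyIdx?]
      have hfold := foldA_eq_goA (d0 :: d1 :: rest) (d0 :: d1 :: rest).length 1 d0 d1 (by omega)
      rw [Nat.cast_one] at hfold
      rw [find_largest_subdigits]
      simp only [hbl, hbr, hfold, List.drop_succ_cons, List.drop_zero,
        goA_spec (d1 :: rest) d0 d1, List.tail_cons]
    -- evaluate port B
    have hB : find_largest_subdigits_alt (d0 :: d1 :: rest) =
        (d1 :: rest).dropLast.foldl max d0 * 10 +
        mxI ((d0 :: d1 :: rest).drop
          ((d0 :: d1 :: rest).idxOf ((d1 :: rest).dropLast.foldl max d0) + 1)) := by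
      have hsl : PySem.List.slice (d0 :: d1 :: rest) none (some (-1)) =
          (d0 :: d1 :: rest).dropLast := PySem.List.slice_to_neg_one _
      have hmax : (PySem.List.max? ((d0 :: d1 :: rest).dropLast) (fun x => x)).getD 0 =
          (d1 :: rest).dropLast.foldl max d0 := by
        rw [List.dropLast_cons₂, PySem.List.max?_id_cons, Option.getD_some]
      have hidx : (PySem.List.index? (d0 :: d1 :: rest) ((d1 :: rest).dropLast.foldl max d0)).getD 0 =
          (d0 :: d1 :: rest).idxOf ((d1 :: rest).dropLast.foldl max d0) := by
        rw [PySem.List.index?_eq_idxOf?, idxOf?_of_mem _ _ hmem, Option.getD_some]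
      have hcast : (((d0 :: d1 :: rest).idxOf ((d1 :: rest).dropLast.foldl max d0) : Int) + 1) =
          (((d0 :: d1 :: rest).idxOf ((d1 :: rest).dropLast.foldl max d0) + 1 : Nat) : Int) := by
        push_cast; ring
      rw [find_largest_subdigits_alt]
      simp only [hsl, hmax, hidx, hcast, PySem.List.slice_from_natCast, mxI_eq_max?getD]
    rw [hA, hB]
    by_cases hc : d0 < (d1 :: rest).dropLast.foldl max d0
    · rw [if_pos hc, List.idxOf_cons_ne _ (ne_of_lt hc)]
      simp [Nat.succ_eq_add_one, List.drop_succ_cons]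
    · have he : d0 = (d1 :: rest).dropLast.foldl max d0 := le_antisymm hd0M (not_lt.mp hc)
      rw [if_neg hc, ← he, List.idxOf_cons_self]
      simp [mxI]

-- ===== VERDICT (by name: the statement is the Claim_ definition above) =====
theorem find_largest_subdigits_spec : Claim_equal_find_largest_subdigits := by
  intro digits _ hpre
  exact final_assembly digits hpre
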